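-- pv_equiv track=rewrite | github.com/gustavo-mota/programming_fundamentals | 7_Sexta_lista/1.10_cc/1.10.py | somatorio
-- ===== SOURCE A (Python) =====
-- def somatorio(numero):
--     somado = 0
--     sinal = False
--     if numero < 0:
--         numero *= -1
--         sinal = True
--     for i in range(1, numero+1):
--         somado = somado + i
--     if sinal == True:
--         somado = somado * -1
--     return somado
-- ===== SOURCE B (Python) =====
-- def somatorio(numero):
--     a = abs(numero)
--     total = a * (a + 1) // 2
--     return -total if numero < 0 else total
-- ===== Notes on version B (the rewrite author's own statement) =====
-- stated objective: faster
-- what changed: Replaced the O(n) summation loop with the closed-form triangular number a*(a+1)//2 applied to |n|, re-negated for negative input.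
import Mathlib
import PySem

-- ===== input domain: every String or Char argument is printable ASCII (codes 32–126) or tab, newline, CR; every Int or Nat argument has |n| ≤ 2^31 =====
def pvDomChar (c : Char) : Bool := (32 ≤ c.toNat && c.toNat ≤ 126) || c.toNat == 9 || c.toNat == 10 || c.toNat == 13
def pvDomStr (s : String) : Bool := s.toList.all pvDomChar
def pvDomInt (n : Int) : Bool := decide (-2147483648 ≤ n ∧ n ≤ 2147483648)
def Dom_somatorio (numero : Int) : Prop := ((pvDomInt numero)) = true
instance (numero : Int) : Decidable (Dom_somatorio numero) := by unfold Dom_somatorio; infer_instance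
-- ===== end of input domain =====

-- B replaces A's O(n) summation loop with the closed-form triangular number |n|*(|n|+1)//2, re-negated for negative input (faster, asymptotic).

-- ===== PORT A =====
def somatorio (numero : Int) : Int :=
  -- somado = 0; sinal = False; if numero < 0: numero *= -1; sinal = True
  let p : Int × Bool := if numero < 0 then (numero * -1, true) else (numero, false)
  -- for i in range(1, numero+1): somado = somado + i
  let somado : Int := (PySem.List.pyRange 1 (p.1 + 1) 1).foldl (fun somado i => somado + i) 0
  -- if sinal == True: somado = somado * -1
  if p.2 = true then somado * -1 else somado

-- ===== PORT B =====
def somatorio_alt (numero : Int) : Int :=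
  let a : Int := |numero|
  let total : Int := PySem.Int.floordiv (a * (a + 1)) 2
  if numero < 0 then -total else total

-- ===== PRECONDITION & SPEC =====
def Spec_somatorio (numero : Int) (out : Int) : Prop := out = somatorio_alt numero
instance (numero : Int) (out : Int) : Decidable (Spec_somatorio numero out) := by unfold Spec_somatorio; infer_instance

-- ===== CLAIM (what is proved, stated in full; the proofs are below) =====
def Claim_equal_somatorio : Prop := ∀ (numero : Int), Dom_somatorio numero → Spec_somatorio numero (somatorio numero)

-- ===== LEMMAS AND PROOFS =====

-- Gauss: twice the loop's sum over range(1, n+1) is n*(n+1).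
theorem pv_sum_two (n : Nat) :
    2 * (PySem.List.pyRange 1 ((n : Int) + 1) 1).foldl (fun s i => s + i) 0 = (n : Int) * ((n : Int) + 1) := by
  induction n with
  | zero => decide
  | succ m ih =>
    have h : (1 : Int) ≤ (m : Int) + 1 := by omega
    have hr : PySem.List.pyRange 1 (((m : Nat) + 1 : Int) + 1) 1
        = PySem.List.pyRange 1 ((m : Int) + 1) 1 ++ [(m : Int) + 1] := by
      exact PySem.List.pyRange_one_succ_right h
    push_cast
    push_cast at hr
    rw [hr, List.foldl_append]
    simp only [List.foldl_cons, List.foldl_nil]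
    ring_nf
    ring_nf at ih
    omega

theorem pv_sum_eq (n : Nat) :
    (PySem.List.pyRange 1 ((n : Int) + 1) 1).foldl (fun s i => s + i) 0
      = PySem.Int.floordiv ((n : Int) * ((n : Int) + 1)) 2 := by
  rw [PySem.Int.floordiv_eq_ediv_of_pos (by omega), ← pv_sum_two n]
  omega

-- ===== VERDICT (by name: the statement is the Claim_ definition above) =====
theorem somatorio_spec : Claim_equal_somatorio := by
  intro numero _
  unfold Spec_somatorio somatorio somatorio_alt
  by_cases hneg : numero < 0
  · simp only [hneg, if_pos]
    have habs : |numero| = -numero := abs_of_neg hneg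
    rw [habs]
    have h1 : numero * -1 = ((numero.natAbs : Int)) := by omega
    have h2 : -numero = ((numero.natAbs : Int)) := by omega
    rw [h1, h2, pv_sum_eq]
    ring
  · simp only [hneg, if_false]
    have h2 : numero = ((numero.natAbs : Int)) := by omega
    rw [abs_of_nonneg (by omega), h2, pv_sum_eq]
    simp
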